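-- pv_equiv track=rewrite | github.com/Usefullatwork/Cot-ExplorerV2 | src/analysis/transaction_costs.py | classify_session
-- ===== SOURCE A (Python) =====
-- _SESSION_RANGES: list[tuple[str, int, int]] = [
--     # Order matters: ny_overlap is a subset of ny, so check it first.
--     ("ny_overlap", 13, 17),
--     ("london", 7, 13),
--     ("ny", 17, 21),
--     # Asian wraps midnight -- handled separately in classify_session.
-- ]
--
-- _ASIAN_START = 23
--
-- _ASIAN_END = 7
--
-- def classify_session(hour_cet: int) -> str:
--     """Map a CET hour (0-23) to a trading session name.
--
--     Session priority (checked in order):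
--     1. ``ny_overlap`` -- 13:00-16:59 CET
--     2. ``london``     -- 07:00-12:59 CET
--     3. ``ny``         -- 17:00-20:59 CET
--     4. ``asian``      -- 23:00-06:59 CET (wraps midnight)
--     5. ``off_hours``  -- anything else (21:00-22:59 CET)
--
--     Parameters
--     ----------
--     hour_cet:
--         Hour of day in CET (0-23).
--
--     Returns
--     -------
--     str
--         One of ``london``, ``ny_overlap``, ``ny``, ``asian``, ``off_hours``.
--     """
--     hour = hour_cet % 24
--
--     for name, start, end in _SESSION_RANGES:
--         if start <= hour < end:
--             return name
--
--     # Asian session wraps midnight: 23 <= hour or hour < 7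
--     if hour >= _ASIAN_START or hour < _ASIAN_END:
--         return "asian"
--
--     return "off_hours"
-- ===== SOURCE B (Python) =====
-- _SESSION_TABLE = (
--     ["asian"] * 7          # 0-6
--     + ["london"] * 6       # 7-12
--     + ["ny_overlap"] * 4   # 13-16
--     + ["ny"] * 4           # 17-20
--     + ["off_hours"] * 2    # 21-22
--     + ["asian"]            # 23
-- )
--
-- def classify_session(hour_cet: int) -> str:
--     return _SESSION_TABLE[hour_cet % 24]
-- ===== Notes on version B (the rewrite author's own statement) =====
-- stated objective: idiomatic
-- what changed: Replaced the loop over ordered (name,start,end) ranges plus a midnight-wrap branch with a constant 24-entry lookup table indexed by hour_cet % 24.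
import Mathlib
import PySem

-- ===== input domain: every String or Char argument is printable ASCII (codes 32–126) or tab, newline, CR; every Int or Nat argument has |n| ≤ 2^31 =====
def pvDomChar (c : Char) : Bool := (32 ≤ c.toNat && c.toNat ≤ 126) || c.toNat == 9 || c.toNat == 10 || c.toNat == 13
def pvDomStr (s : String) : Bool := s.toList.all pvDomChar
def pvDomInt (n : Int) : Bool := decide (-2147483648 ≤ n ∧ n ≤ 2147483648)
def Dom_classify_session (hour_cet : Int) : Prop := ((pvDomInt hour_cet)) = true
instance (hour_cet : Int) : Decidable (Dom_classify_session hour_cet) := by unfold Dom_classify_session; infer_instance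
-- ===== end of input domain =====

-- B replaces A's ordered range scan + wrap branch with a constant 24-entry lookup table (idiomatic).


-- ===== PORT A =====
def sessionRanges : List (String × Int × Int) :=
  [("ny_overlap", 13, 17), ("london", 7, 13), ("ny", 17, 21)]

def asianStart : Int := 23
def asianEnd : Int := 7

-- the for-loop with early return, then the wrap branch
def scanRanges (hour : Int) : List (String × Int × Int) → Option String
  | [] => none
  | (name, start, «end») :: rest =>
      if start ≤ hour ∧ hour < «end» then some name else scanRanges hour rest

def classify_session (hour_cet : Int) : String :=
  let hour := PySem.Int.mod hour_cet 24
  match scanRanges hour sessionRanges with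
  | some name => name
  | none =>
      if hour ≥ asianStart ∨ hour < asianEnd then "asian" else "off_hours"

-- ===== PORT B =====
def sessionTable : List String :=
  List.replicate 7 "asian" ++ List.replicate 6 "london" ++ List.replicate 4 "ny_overlap"
    ++ List.replicate 4 "ny" ++ List.replicate 2 "off_hours" ++ ["asian"]

def classify_session_alt (hour_cet : Int) : String :=
  (PySem.List.pyGet? sessionTable (PySem.Int.mod hour_cet 24)).getD ""  -- index always in range

-- ===== PRECONDITION & SPEC =====
def Spec_classify_session (hour_cet : Int) (out : String) : Prop := out = classify_session_alt hour_cet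
instance (hour_cet : Int) (out : String) : Decidable (Spec_classify_session hour_cet out) := by unfold Spec_classify_session; infer_instance

-- ===== CLAIM (what is proved, stated in full; the proofs are below) =====
def Claim_equal_classify_session : Prop := ∀ (hour_cet : Int), Dom_classify_session hour_cet → Spec_classify_session hour_cet (classify_session hour_cet)

-- ===== LEMMAS AND PROOFS =====
theorem classify_eq (hour_cet : Int) : classify_session hour_cet = classify_session_alt hour_cet := by
  unfold classify_session classify_session_alt
  have h0 : 0 ≤ PySem.Int.mod hour_cet 24 := PySem.Int.mod_nonneg _ (by norm_num)
  have h1 : PySem.Int.mod hour_cet 24 < 24 := PySem.Int.mod_lt _ (by norm_num)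
  set h := PySem.Int.mod hour_cet 24 with hh
  clear_value h
  interval_cases h <;> decide

-- ===== VERDICT (by name: the statement is the Claim_ definition above) =====
theorem classify_session_spec : Claim_equal_classify_session := by
  intro h _
  unfold Spec_classify_session
  exact classify_eq h
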